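-- pv_equiv track=rewrite | github.com/shouryagoyal123456/Assignment | main.py | calculate_sum_of_squares
-- ===== SOURCE A (Python) =====
-- def calculate_sum_of_squares(nums):
--     if not nums:
--         return 0
--     else:
--         num = nums[0]
--         if num >= 0:
--             return num * num + calculate_sum_of_squares(nums[1:])
--         else:
--             return calculate_sum_of_squares(nums[1:])
-- ===== SOURCE B (Python) =====
-- def calculate_sum_of_squares(nums):
--     total = 0
--     for num in nums:
--         if num >= 0:
--             total += num * num
--     return total
-- ===== Notes on version B (the rewrite author's own statement) =====
-- stated objective: faster
-- what changed: Replaced head/tail recursion (which copies nums[1:] on every call) with a single iterative for-loop over nums accumulating the total.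
import Mathlib
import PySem

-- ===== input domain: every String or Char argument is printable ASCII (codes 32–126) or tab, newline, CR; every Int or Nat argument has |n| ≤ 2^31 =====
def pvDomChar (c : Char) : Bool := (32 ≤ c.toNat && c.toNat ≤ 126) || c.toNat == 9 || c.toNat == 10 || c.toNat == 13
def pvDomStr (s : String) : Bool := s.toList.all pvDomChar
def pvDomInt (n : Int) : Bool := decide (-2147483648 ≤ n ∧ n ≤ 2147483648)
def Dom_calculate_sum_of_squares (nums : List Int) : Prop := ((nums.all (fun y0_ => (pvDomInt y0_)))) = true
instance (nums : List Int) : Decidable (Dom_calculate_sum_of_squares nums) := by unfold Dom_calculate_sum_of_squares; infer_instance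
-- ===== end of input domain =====

-- ===== PORT A =====
-- Port of A: structural recursion on the list, matching A's head/tail recursion.
def calculate_sum_of_squares (nums : List Int) : Int :=
  match nums with
  | [] => 0
  | num :: rest =>
    if num ≥ 0 then num * num + calculate_sum_of_squares rest
    else calculate_sum_of_squares rest

-- ===== PORT B =====
-- Port of B: iterative loop with accumulator = foldl over nums.
def calculate_sum_of_squares_alt (nums : List Int) : Int :=
  nums.foldl (fun total num => if num ≥ 0 then total + num * num else total) 0

-- ===== PRECONDITION & SPEC =====
def Spec_calculate_sum_of_squares (nums : List Int) (out : Int) : Prop := out = calculate_sum_of_squares_alt nums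
instance (nums : List Int) (out : Int) : Decidable (Spec_calculate_sum_of_squares nums out) := by unfold Spec_calculate_sum_of_squares; infer_instance

-- ===== CLAIM (what is proved, stated in full; the proofs are below) =====
def Claim_equal_calculate_sum_of_squares : Prop := ∀ (nums : List Int), Dom_calculate_sum_of_squares nums → Spec_calculate_sum_of_squares nums (calculate_sum_of_squares nums)

-- ===== LEMMAS AND PROOFS =====
-- Loop invariant: folding from accumulator t yields t + recursive sum.
theorem alt_foldl_acc (nums : List Int) (t : Int) :
    nums.foldl (fun total num => if num ≥ 0 then total + num * num else total) t
      = t + calculate_sum_of_squares nums := by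
  induction nums generalizing t with
  | nil => simp [calculate_sum_of_squares]
  | cons x xs ih =>
    simp only [List.foldl, calculate_sum_of_squares]
    split_ifs with h <;> rw [ih] <;> ring

-- ===== VERDICT (by name: the statement is the Claim_ definition above) =====
theorem calculate_sum_of_squares_spec : Claim_equal_calculate_sum_of_squares := by
  intro nums _
  unfold Spec_calculate_sum_of_squares calculate_sum_of_squares_alt
  rw [alt_foldl_acc]; ring
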